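-- pv_equiv track=rewrite | github.com/theri6v/CodeSprintSolutions | GeekForGeek/Problem Of The Day/Maximum sum of elements not part of LIS.py | nonLisMaxSum
-- ===== SOURCE A (Python) =====
-- from bisect import bisect_left
--
-- def nonLisMaxSum(arr):
--     LIS=[]
--     liSum=[0]*(len(arr)+1)
--     tot_sum=0
--     for i in range(len(arr)):
--         tot_sum+=arr[i]
--         idx=bisect_left(LIS,arr[i])
--         if idx==len(LIS):
--             LIS.append(arr[i])
--         else:
--             LIS[idx]=arr[i]
--         liSum[idx+1]=liSum[idx]+arr[i]
--     return tot_sum-liSum[len(LIS)]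
-- ===== SOURCE B (Python) =====
-- from bisect import bisect_left
--
-- def nonLisMaxSum(arr):
--     # Same patience loop, but instead of a prefix-sum array we keep, for each
--     # pile, a persistent predecessor chain (value, prev) and reconstruct the
--     # tracked LIS sum after the loop.
--     tails = []
--     chains = []
--     tot = 0
--     for x in arr:
--         tot += x
--         idx = bisect_left(tails, x)
--         node = (x, chains[idx - 1] if idx > 0 else None)
--         if idx == len(tails):
--             tails.append(x)
--             chains.append(node)
--         else:
--             tails[idx] = x
--             chains[idx] = node
--     s = 0
--     node = chains[-1] if chains else None
--     while node is not None:
--         v, node = node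
--         s += v
--     return tot - s
-- ===== Notes on version B (the rewrite author's own statement) =====
-- stated objective: alternative
-- what changed: Replaces A's inline liSum prefix-sum array by a persistent predecessor chain stored per patience pile, with a separate post-loop pass that walks the chain of the top pile to reconstruct the tracked LIS sum.
import Mathlib
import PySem

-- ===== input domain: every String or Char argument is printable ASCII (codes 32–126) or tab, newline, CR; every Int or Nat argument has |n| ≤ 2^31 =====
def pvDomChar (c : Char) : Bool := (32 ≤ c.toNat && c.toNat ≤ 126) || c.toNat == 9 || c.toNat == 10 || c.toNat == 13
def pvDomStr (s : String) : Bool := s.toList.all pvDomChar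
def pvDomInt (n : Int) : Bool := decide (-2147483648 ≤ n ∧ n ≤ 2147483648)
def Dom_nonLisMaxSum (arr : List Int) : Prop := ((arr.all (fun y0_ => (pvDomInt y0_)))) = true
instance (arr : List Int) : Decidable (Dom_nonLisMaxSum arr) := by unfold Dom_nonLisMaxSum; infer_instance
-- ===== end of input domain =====

-- B replaces A's inline liSum prefix-sum array by persistent predecessor chains per
-- pile, reconstructing the tracked LIS sum after the loop (alternative decomposition).

-- bisect.bisect_left on a sorted list: first index whose element is ≥ x (len if none)
def bisectLeft (l : List Int) (x : Int) : Nat := l.findIdx (fun y => decide (x ≤ y))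

-- ===== PORT A =====
-- loop body of A: state (LIS, liSum, tot_sum)
def stepA : List Int × List Int × Int → Int → List Int × List Int × Int
  | (lis, liSum, tot), a =>
    let idx := bisectLeft lis a
    (if idx = lis.length then lis ++ [a] else lis.set idx a,
     liSum.set (idx + 1) (liSum.getD idx 0 + a),
     tot + a)

def nonLisMaxSum (arr : List Int) : Int :=
  match arr.foldl stepA ([], List.replicate (arr.length + 1) 0, 0) with
  | (lis, liSum, tot) => tot - liSum.getD lis.length 0

-- ===== PORT B =====
-- a Python tuple chain (v, prev) / None, as in Source B
inductive Chain where
  | nil : Chain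
  | cons : Int → Chain → Chain
deriving DecidableEq, Repr

-- the final while-loop of Source B: sum the values along a chain
def chainSum : Chain → Int
  | .nil => 0
  | .cons v r => v + chainSum r

-- loop body of B: state (tails, chains, tot)
def stepB : List Int × List Chain × Int → Int → List Int × List Chain × Int
  | (tails, chains, tot), x =>
    let idx := bisectLeft tails x
    let node := Chain.cons x (if 0 < idx then chains.getD (idx - 1) Chain.nil else Chain.nil)
    if idx = tails.length then (tails ++ [x], chains ++ [node], tot + x)
    else (tails.set idx x, chains.set idx node, tot + x)

def nonLisMaxSum_alt (arr : List Int) : Int :=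
  match arr.foldl stepB ([], [], 0) with
  | (_, chains, tot) =>
    tot - (match chains.getLast? with | none => 0 | some c => chainSum c)

-- ===== PRECONDITION & SPEC =====
def Spec_nonLisMaxSum (arr : List Int) (out : Int) : Prop := out = nonLisMaxSum_alt arr
instance (arr : List Int) (out : Int) : Decidable (Spec_nonLisMaxSum arr out) := by unfold Spec_nonLisMaxSum; infer_instance

-- ===== CLAIM (what is proved, stated in full; the proofs are below) =====
def Claim_equal_nonLisMaxSum : Prop := ∀ (arr : List Int), Dom_nonLisMaxSum arr → Spec_nonLisMaxSum arr (nonLisMaxSum arr)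

-- ===== LEMMAS AND PROOFS =====

-- Bisimulation invariant between A's state (lis, liSum, tot) and B's (tails, chains, tot):
-- same tails and total; chains parallels lis; liSum[0] stays 0; and for each pile k,
-- liSum[k+1] equals the sum along the chain currently stored for pile k.
-- `slack` = number of loop iterations still to run, keeping liSum writes in range.
def InvAB (p : List Int × List Int × Int) (q : List Int × List Chain × Int) (slack : Nat) : Prop :=
  q.1 = p.1 ∧ q.2.2 = p.2.2 ∧ q.2.1.length = p.1.length ∧
  p.1.length + 1 + slack ≤ p.2.1.length ∧
  p.2.1.getD 0 0 = 0 ∧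
  ∀ k < p.1.length, p.2.1.getD (k + 1) 0 = chainSum (q.2.1.getD k Chain.nil)

lemma getD_eq (l : List Int) (n : Nat) : l.getD n 0 = (l[n]?).getD 0 :=
  List.getD_eq_getElem?_getD

lemma getDc_eq (l : List Chain) (n : Nat) : l.getD n Chain.nil = (l[n]?).getD Chain.nil :=
  List.getD_eq_getElem?_getD

lemma step_pres (lis liSum : List Int) (chains : List Chain) (tot : Int) (slack : Nat) (a : Int)
    (hC : chains.length = lis.length)
    (hlen : lis.length + 1 + (slack + 1) ≤ liSum.length)
    (h0 : liSum.getD 0 0 = 0)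
    (hk : ∀ k < lis.length, liSum.getD (k + 1) 0 = chainSum (chains.getD k Chain.nil)) :
    InvAB (stepA (lis, liSum, tot) a) (stepB (lis, chains, tot) a) slack := by
  have hidx : bisectLeft lis a ≤ lis.length := List.findIdx_le_length
  simp only [stepA, stepB]
  generalize hg : bisectLeft lis a = idx at hidx ⊢
  have hwr : idx + 1 < liSum.length := by omega
  have hslot : liSum.getD idx 0 + a =
      chainSum (Chain.cons a (if 0 < idx then chains.getD (idx - 1) Chain.nil else Chain.nil)) := by
    rcases Nat.eq_zero_or_pos idx with h0' | hpos
    · subst h0'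
      rw [h0, if_neg (by omega : ¬ (0:Nat) < 0)]
      simp [chainSum]
    · have hki := hk (idx - 1) (by omega)
      have hi1 : idx - 1 + 1 = idx := by omega
      rw [hi1] at hki
      rw [if_pos hpos, chainSum, ← hki]
      ring
  by_cases hcase : idx = lis.length
  · simp only [if_pos hcase]
    refine ⟨rfl, rfl, by simp [hC, hcase], by simp; omega, ?_, ?_⟩
    · rw [getD_eq, List.getElem?_set_ne (by omega), ← getD_eq]
      exact h0
    · intro k hkl
      simp only [List.length_append, List.length_cons, List.length_nil] at hkl
      dsimp only
      by_cases hke : k = lis.length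
      · subst hke
        rw [← hcase]
        have hic : chains.length = idx := by omega
        have hcat : (chains ++ [Chain.cons a (if 0 < idx then chains.getD (idx - 1) Chain.nil else Chain.nil)])[chains.length]? = some (Chain.cons a (if 0 < idx then chains.getD (idx - 1) Chain.nil else Chain.nil)) := List.getElem?_concat_length
        rw [hic] at hcat
        rw [getD_eq, List.getElem?_set_self hwr, getDc_eq, hcat]
        simpa using hslot
      · have hklt : k < lis.length := by omega
        rw [getD_eq, List.getElem?_set_ne (by omega), ← getD_eq,
          getDc_eq, List.getElem?_append_left (by omega : k < chains.length), ← getDc_eq]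
        exact hk k hklt
  · have hlt : idx < lis.length := lt_of_le_of_ne hidx hcase
    simp only [if_neg hcase]
    refine ⟨rfl, rfl, by simp [hC], by simp; omega, ?_, ?_⟩
    · rw [getD_eq, List.getElem?_set_ne (by omega), ← getD_eq]
      exact h0
    · intro k hkl
      simp only [List.length_set] at hkl
      dsimp only
      by_cases hke : k = idx
      · subst hke
        rw [getD_eq, List.getElem?_set_self hwr,
          getDc_eq, List.getElem?_set_self (by omega : k < chains.length)]
        simpa [getD_eq] using hslot
      · rw [getD_eq, List.getElem?_set_ne (by omega), ← getD_eq,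
          getDc_eq, List.getElem?_set_ne (by omega), ← getDc_eq]
        exact hk k hkl

lemma fold_pres (rest : List Int) (p : List Int × List Int × Int)
    (q : List Int × List Chain × Int) (h : InvAB p q rest.length) :
    InvAB (rest.foldl stepA p) (rest.foldl stepB q) 0 := by
  induction rest generalizing p q with
  | nil => simpa using h
  | cons a rest ih =>
    simp only [List.foldl_cons]
    obtain ⟨lis, liSum, tot⟩ := p
    obtain ⟨tails, chains, tot'⟩ := q
    obtain ⟨hT, ht, hC, hlen, h0, hk⟩ := h
    simp only at hT ht hC hlen h0 hk
    subst hT ht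
    exact ih _ _ (step_pres _ _ _ _ _ _ hC (by simpa using hlen) h0 hk)

-- ===== VERDICT (by name: the statement is the Claim_ definition above) =====
theorem nonLisMaxSum_spec : Claim_equal_nonLisMaxSum := by
  intro arr _
  unfold Spec_nonLisMaxSum nonLisMaxSum nonLisMaxSum_alt
  have hinit : InvAB ([], List.replicate (arr.length + 1) 0, 0) ([], [], 0) arr.length := by
    refine ⟨rfl, rfl, rfl, by simp; omega, ?_, by intro k hk; simp at hk⟩
    rw [getD_eq]
    simp
  have h := fold_pres arr _ _ hinit
  obtain ⟨⟨lis, liSum, tot⟩, hpA⟩ : ∃ p, arr.foldl stepA ([], List.replicate (arr.length + 1) 0, 0) = p := ⟨_, rfl⟩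
  obtain ⟨⟨tails, chains, tot'⟩, hpB⟩ : ∃ q, arr.foldl stepB ([], [], 0) = q := ⟨_, rfl⟩
  rw [hpA, hpB] at h
  rw [hpA, hpB]
  obtain ⟨hT, ht, hC, _, h0, hk⟩ := h
  simp only at hT ht hC h0 hk
  simp only [ht]
  rcases hl : lis.length with _ | m
  · have hce : chains = [] := List.eq_nil_of_length_eq_zero (hC.trans hl)
    rw [getD_eq] at h0
    simp [hce, h0]
  · have hm : m < chains.length := by omega
    have hlast : chains.getLast? = chains[m]? := by
      rw [List.getLast?_eq_getElem?]
      congr 1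
      omega
    have hv := hk m (by omega)
    rw [getDc_eq, List.getElem?_eq_getElem hm] at hv
    simp only [Option.getD_some] at hv
    simp only [hlast, List.getElem?_eq_getElem hm, hv]
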